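-- pv_equiv track=rewrite | github.com/Davidxswang/leetcode | easy/1170-Compare Strings by Frequency of the Smallest Character.py | f
-- ===== SOURCE A (Python) =====
-- def f(string: str) -> int:
--     currentletter = string[0]
--     freq = 1
--     for letter in string[1:]:
--         if letter == currentletter:
--             freq += 1
--         elif letter < currentletter:
--             currentletter = letter
--             freq = 1
--     return freq
-- ===== SOURCE B (Python) =====
-- def f(string: str) -> int:
--     smallest = string[0]
--     for ch in string[1:]:
--         if ch < smallest:
--             smallest = ch
--     return sum(1 for ch in string if ch == smallest)
-- ===== Notes on version B (the rewrite author's own statement) =====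
-- stated objective: simpler
-- what changed: Replaces A's single fused scan that maintains a current-minimum together with a running frequency counter (reset on each new minimum) by two independent phases: first find the smallest character, then count its occurrences over the whole string.
import Mathlib
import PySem

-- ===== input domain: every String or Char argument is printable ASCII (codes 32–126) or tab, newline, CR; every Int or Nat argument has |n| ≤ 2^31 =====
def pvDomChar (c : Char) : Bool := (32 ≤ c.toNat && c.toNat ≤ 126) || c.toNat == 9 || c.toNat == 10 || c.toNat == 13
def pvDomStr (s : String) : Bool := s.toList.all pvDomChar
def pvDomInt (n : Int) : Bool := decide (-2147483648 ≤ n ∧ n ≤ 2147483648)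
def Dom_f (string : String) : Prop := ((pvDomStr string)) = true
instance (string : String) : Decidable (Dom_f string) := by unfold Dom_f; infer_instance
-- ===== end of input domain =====

-- B splits A's fused minimum-plus-running-frequency scan into two phases: find the smallest
-- character, then count its occurrences (simpler; same cost).

-- ===== PORT A =====
-- A's loop over string[1:] (the tail), state = (currentletter, freq).
def f (string : String) : Int :=
  match string.toList with
  | [] => 0  -- unreachable under Pre_f: Python's string[0] raises IndexError on ""
  | c :: rest =>
      (rest.foldl
        (fun (st : Char × Int) letter =>
          if letter == st.1 then (st.1, st.2 + 1)
          else if letter < st.1 then (letter, 1)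
          else st)
        (c, 1)).2

-- ===== PORT B =====
-- phase 1: minimum over string[1:] seeded with string[0]; phase 2: sum(1 for ch in string if ch == smallest).
def f_alt (string : String) : Int :=
  match string.toList with
  | [] => 0  -- unreachable under Pre_f: Python's string[0] raises IndexError on ""
  | c :: rest =>
      let smallest := rest.foldl (fun s ch => if ch < s then ch else s) c
      (c :: rest).foldl (fun (n : Int) ch => if ch == smallest then n + 1 else n) 0

-- ===== PRECONDITION & SPEC =====
-- Pre_f excludes only the empty string, on which A raises IndexError (string[0]).
def Pre_f (string : String) : Prop := string ≠ ""
instance (string : String) : Decidable (Pre_f string) := by unfold Pre_f; infer_instance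
def pvWitness_f : String := "ab"

def Spec_f (string : String) (out : Int) : Prop := out = f_alt string
instance (string : String) (out : Int) : Decidable (Spec_f string out) := by unfold Spec_f; infer_instance

-- ===== CLAIM (what is proved, stated in full; the proofs are below) =====
def Claim_equal_f : Prop := ∀ (string : String), Dom_f string → Pre_f string → Spec_f string (f string)

-- ===== LEMMAS AND PROOFS =====

-- B's phase-1 minimum never exceeds its seed.
theorem minsLe (l : List Char) (c : Char) :
    l.foldl (fun s ch => if ch < s then ch else s) c ≤ c := by
  induction l generalizing c with
  | nil => exact le_refl c
  | cons a l ih =>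
      simp only [List.foldl_cons]
      split_ifs with h
      · exact le_trans (ih a) (le_of_lt h)
      · exact ih c

-- B's counting fold is List.count.
theorem cntFold (l : List Char) (m : Char) (n : Int) :
    l.foldl (fun (n : Int) ch => if ch == m then n + 1 else n) n = n + (l.count m : Int) := by
  induction l generalizing n with
  | nil => simp
  | cons a l ih =>
      simp only [List.foldl_cons, List.count_cons, ih]
      by_cases h : a = m
      · simp [h]
        omega
      · have hb : (a == m) = false := by simp [h]
        simp [hb]

-- A's fused loop computes: if the seed is the minimum, k plus the tail-count of the seed,
-- else the tail-count of the minimum.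
theorem loopA (l : List Char) (c : Char) (k : Int) :
    (l.foldl
      (fun (st : Char × Int) letter =>
        if letter == st.1 then (st.1, st.2 + 1)
        else if letter < st.1 then (letter, 1)
        else st)
      (c, k)).2 =
    if l.foldl (fun s ch => if ch < s then ch else s) c = c
    then k + (l.count c : Int)
    else ((l.count (l.foldl (fun s ch => if ch < s then ch else s) c)) : Int) := by
  induction l generalizing c k with
  | nil => simp
  | cons a l ih =>
      simp only [List.foldl_cons]
      by_cases hac : a = c
      · subst hac
        have hb : (a == a) = true := by simp
        rw [hb]
        have hs : (if a < a then a else a) = a := by simp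
        rw [hs]
        simp only [if_true, ih]
        by_cases hm : l.foldl (fun s ch => if ch < s then ch else s) a = a
        · rw [if_pos hm, if_pos hm, List.count_cons_self]
          push_cast; ring
        · have hne : l.foldl (fun s ch => if ch < s then ch else s) a ≠ a := hm
          rw [if_neg hm, if_neg hm]
          simp [Ne.symm hne]
      · have hbeq : (a == c) = false := by simp [hac]
        rw [hbeq]
        simp only [Bool.false_eq_true, if_false]
        by_cases hlt : a < c
        · rw [if_pos hlt, if_pos hlt]
          simp only [ih]
          have hseed : ¬ (l.foldl (fun s ch => if ch < s then ch else s) a = c) := by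
            intro h
            have := minsLe l a
            rw [h] at this
            exact absurd (lt_of_lt_of_le hlt this) (lt_irrefl a)
          rw [if_neg hseed]
          by_cases hm : l.foldl (fun s ch => if ch < s then ch else s) a = a
          · rw [if_pos hm, hm, List.count_cons_self]
            push_cast; ring
          · have hne : l.foldl (fun s ch => if ch < s then ch else s) a ≠ a := hm
            rw [if_neg hm]
            simp [Ne.symm hne]
        · rw [if_neg hlt, if_neg hlt]
          simp only [ih]
          by_cases hm : l.foldl (fun s ch => if ch < s then ch else s) c = c
          · rw [if_pos hm, if_pos hm]
            simp [hac]
          · have hmin_lt : l.foldl (fun s ch => if ch < s then ch else s) c < c :=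
              lt_of_le_of_ne (minsLe l c) hm
            have hca : c < a := lt_of_le_of_ne (not_lt.mp hlt) (Ne.symm hac)
            have hne : l.foldl (fun s ch => if ch < s then ch else s) c ≠ a :=
              ne_of_lt (lt_trans hmin_lt hca)
            rw [if_neg hm, if_neg hm]
            simp [Ne.symm hne]

-- ===== VERDICT (by name: the statement is the Claim_ definition above) =====
theorem f_spec : Claim_equal_f := by
  intro s _ _
  unfold Spec_f f f_alt
  match h : s.toList with
  | [] => rfl
  | c :: rest =>
      simp only []
      rw [loopA, cntFold]
      by_cases hm : rest.foldl (fun s ch => if ch < s then ch else s) c = c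
      · simp [hm]
        omega
      · have hne : rest.foldl (fun s ch => if ch < s then ch else s) c ≠ c := hm
        simp [hm, hne.symm]
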